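-- pv_equiv track=rewrite | github.com/YouAreProgrammedXD/PropagationRumeur | main.py | creer
-- ===== SOURCE A (Python) =====
-- def creer(taille,k,classe):
--     if k==0:
--         return([i for i in range(1,taille+1)])
--     elif (k>=classe+taille+1 or k<classe+1):
--         return([i for i in range(classe+1,classe+taille+1)])
--     else:
--         liste=[i for i in range(classe+1,classe+taille+2)]
--         liste.remove(k)
--         return(liste)
-- ===== SOURCE B (Python) =====
-- def creer(taille, k, classe):
--     if k == 0:
--         return list(range(1, taille + 1))
--     # one unified computation: over-generate one slot, filter k out, trim to taille
--     return [i for i in range(classe + 1, classe + taille + 2) if i != k][:taille]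
-- ===== Notes on version B (the rewrite author's own statement) =====
-- stated objective: simpler
-- what changed: A's two non-zero-k branches (outside-range copy vs build-then-remove) are merged into one computation that builds range(classe+1, classe+taille+2) filtering out k during construction and trims the result to taille elements with a slice.
import Mathlib
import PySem

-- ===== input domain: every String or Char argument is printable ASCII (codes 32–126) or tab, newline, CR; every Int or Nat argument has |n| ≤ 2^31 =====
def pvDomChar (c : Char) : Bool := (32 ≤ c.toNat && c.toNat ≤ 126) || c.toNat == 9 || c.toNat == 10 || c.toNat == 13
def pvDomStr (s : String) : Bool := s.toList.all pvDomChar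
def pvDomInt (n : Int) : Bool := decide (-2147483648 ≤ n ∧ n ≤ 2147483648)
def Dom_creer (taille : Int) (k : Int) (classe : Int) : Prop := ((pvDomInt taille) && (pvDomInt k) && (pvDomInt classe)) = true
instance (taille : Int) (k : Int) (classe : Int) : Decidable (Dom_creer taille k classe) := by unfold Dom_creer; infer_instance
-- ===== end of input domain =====

-- B merges A's two non-zero-k branches into one filter-and-trim computation (objective: simpler).

-- ===== PORT A =====
def creer (taille : Int) (k : Int) (classe : Int) : List Int :=
  if k == 0 then
    PySem.List.pyRange 1 (taille + 1) 1
  else if k ≥ classe + taille + 1 ∨ k < classe + 1 then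
    PySem.List.pyRange (classe + 1) (classe + taille + 1) 1
  else
    let liste := PySem.List.pyRange (classe + 1) (classe + taille + 2) 1
    -- liste.remove(k): in this branch k is always in liste, so the ValueError case is unreachable
    (PySem.List.remove? liste k).getD []

-- ===== PORT B =====
def creer_alt (taille : Int) (k : Int) (classe : Int) : List Int :=
  if k == 0 then
    PySem.List.pyRange 1 (taille + 1) 1
  else
    PySem.List.slice ((PySem.List.pyRange (classe + 1) (classe + taille + 2) 1).filter (· != k))
      none (some taille)

-- ===== PRECONDITION & SPEC =====
def Spec_creer (taille : Int) (k : Int) (classe : Int) (out : List Int) : Prop := out = creer_alt taille k classe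
instance (taille : Int) (k : Int) (classe : Int) (out : List Int) : Decidable (Spec_creer taille k classe out) := by unfold Spec_creer; infer_instance

-- ===== CLAIM (what is proved, stated in full; the proofs are below) =====
def Claim_equal_creer : Prop := ∀ (taille : Int) (k : Int) (classe : Int), Dom_creer taille k classe → Spec_creer taille k classe (creer taille k classe)

-- ===== LEMMAS AND PROOFS =====

-- ===== VERDICT (by name: the statement is the Claim_ definition above) =====
theorem creer_spec : Claim_equal_creer := by
  unfold Claim_equal_creer
  intro t k c _
  unfold Spec_creer creer creer_alt
  by_cases hk : k = 0
  · simp [hk]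
  · have hk' : (k == 0) = false := by simpa using hk
    rw [hk']
    simp only [Bool.false_eq_true, if_false]
    by_cases ht : t < 0
    · -- taille < 0: everything is empty
      have h1 : PySem.List.pyRange (c+1) (c+t+2) 1 = [] :=
        PySem.List.pyRange_one_eq_nil (by omega)
      have h2 : PySem.List.pyRange (c+1) (c+t+1) 1 = [] :=
        PySem.List.pyRange_one_eq_nil (by omega)
      have hcond : k ≥ c + t + 1 ∨ k < c + 1 := by omega
      rw [if_pos hcond, h1, h2]
      simp [PySem.List.slice]
    · push Not at ht
      have hsplit : PySem.List.pyRange (c+1) (c+t+2) 1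
          = PySem.List.pyRange (c+1) (c+t+1) 1 ++ [c+t+1] := by
        have := PySem.List.pyRange_one_succ_right (a := c+1) (b := c+t+1) (by omega)
        simpa [show c + t + 1 + 1 = c + t + 2 by ring] using this
      have hlen1 : (PySem.List.pyRange (c+1) (c+t+1) 1).length = t.toNat := by
        rw [PySem.List.length_pyRange_one]; omega
      by_cases hcond : k ≥ c + t + 1 ∨ k < c + 1
      · rw [if_pos hcond]
        have hnotmem : k ∉ PySem.List.pyRange (c+1) (c+t+1) 1 := by
          rw [PySem.List.mem_pyRange_one]; omega
        have hfilter1 : (PySem.List.pyRange (c+1) (c+t+1) 1).filter (· != k)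
            = PySem.List.pyRange (c+1) (c+t+1) 1 := by
          rw [List.filter_eq_self]
          intro a ha
          simp only [bne_iff_ne, ne_eq]
          exact fun h => hnotmem (h ▸ ha)
        rw [hsplit, List.filter_append, hfilter1]
        by_cases hke : k = c + t + 1
        · have hone : ([c+t+1] : List Int).filter (· != k) = [] := by
            simp [hke]
          rw [hone, List.append_nil, PySem.List.slice_to _ ht,
            List.take_of_length_le (by omega)]
        · have hone : ([c+t+1] : List Int).filter (· != k) = [c+t+1] := by
            simp [bne_iff_ne, Ne.symm hke]
          rw [hone, PySem.List.slice_to _ ht, List.take_left' hlen1]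
      · rw [if_neg hcond]
        push Not at hcond
        have hmem : k ∈ PySem.List.pyRange (c+1) (c+t+2) 1 := by
          rw [PySem.List.mem_pyRange_one]; omega
        rw [PySem.List.remove?_eq_some_erase _ k hmem, Option.getD_some,
          ← List.Nodup.erase_eq_filter (PySem.List.nodup_pyRange_one _ _) k,
          PySem.List.slice_to _ ht, List.take_of_length_le]
        rw [List.length_erase_of_mem hmem, PySem.List.length_pyRange_one]
        omega
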